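-- pv_equiv track=rewrite | github.com/nautechsystems/nautilus_trader | nautilus_trader/adapters/deribit/data.py | _map_minute_step_to_resolution
-- ===== SOURCE A (Python) =====
-- def _map_minute_step_to_resolution(step: int) -> str:
--     """
--     Map minute step to nearest Deribit resolution.
--     """
--     # Thresholds: (max_step, resolution_string)
--     thresholds = [
--         (1, "1"),
--         (3, "3"),
--         (5, "5"),
--         (10, "10"),
--         (15, "15"),
--         (30, "30"),
--         (60, "60"),
--         (120, "120"),
--         (180, "180"),
--         (360, "360"),
--         (720, "720"),
--     ]
--     for max_step, resolution in thresholds: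
--         if step <= max_step:
--             return resolution
--     return "1D"
-- ===== SOURCE B (Python) =====
-- import bisect
--
-- _CUTOFFS = [1, 3, 5, 10, 15, 30, 60, 120, 180, 360, 720]
-- _RESOLUTIONS = ["1", "3", "5", "10", "15", "30", "60", "120", "180", "360", "720"]
--
--
-- def _map_minute_step_to_resolution(step: int) -> str:
--     """
--     Map minute step to nearest Deribit resolution.
--     """
--     i = bisect.bisect_left(_CUTOFFS, step)
--     if i < len(_RESOLUTIONS):
--         return _RESOLUTIONS[i]
--     return "1D"
-- ===== Notes on version B (the rewrite author's own statement) =====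
-- stated objective: idiomatic
-- what changed: Replaces the linear scan over (cutoff, resolution) pairs with a binary search (bisect_left) over a sorted cutoff table indexing a parallel resolution list.
import Mathlib
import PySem

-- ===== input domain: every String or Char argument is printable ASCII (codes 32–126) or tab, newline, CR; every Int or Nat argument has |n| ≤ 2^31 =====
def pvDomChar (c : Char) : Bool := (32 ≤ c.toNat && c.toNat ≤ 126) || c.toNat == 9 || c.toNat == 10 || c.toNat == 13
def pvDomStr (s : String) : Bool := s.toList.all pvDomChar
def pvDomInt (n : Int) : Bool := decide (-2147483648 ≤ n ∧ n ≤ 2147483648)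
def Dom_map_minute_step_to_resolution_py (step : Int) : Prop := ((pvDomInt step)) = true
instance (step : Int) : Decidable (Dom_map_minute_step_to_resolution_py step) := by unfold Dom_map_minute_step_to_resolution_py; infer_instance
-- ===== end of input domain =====

-- B replaces A's linear threshold scan with a bisect_left binary search over a sorted cutoff table (idiomatic table lookup; same cost at this table size).


-- ===== PORT A =====
-- the 'for max_step, resolution in thresholds: if step <= max_step: return resolution' loop
def pvScanThresholds (step : Int) : List (Int × String) → String
  | [] => "1D"
  | (max_step, resolution) :: rest =>
      if step ≤ max_step then resolution else pvScanThresholds step rest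

def map_minute_step_to_resolution_py (step : Int) : String :=
  let thresholds : List (Int × String) :=
    [(1, "1"), (3, "3"), (5, "5"), (10, "10"), (15, "15"), (30, "30"),
     (60, "60"), (120, "120"), (180, "180"), (360, "360"), (720, "720")]
  pvScanThresholds step thresholds

-- ===== PORT B =====
def map_minute_step_to_resolution_py_alt (step : Int) : String :=
  let cutoffs : List Int := [1, 3, 5, 10, 15, 30, 60, 120, 180, 360, 720]
  let resolutions : List String := ["1", "3", "5", "10", "15", "30", "60", "120", "180", "360", "720"]
  let i := PySem.List.bisectLeft cutoffs step
  if i < resolutions.length then (PySem.List.pyGet? resolutions (i : Int)).getD "1D" else "1D"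

-- ===== PRECONDITION & SPEC =====
def Spec_map_minute_step_to_resolution_py (step : Int) (out : String) : Prop := out = map_minute_step_to_resolution_py_alt step
instance (step : Int) (out : String) : Decidable (Spec_map_minute_step_to_resolution_py step out) := by unfold Spec_map_minute_step_to_resolution_py; infer_instance

-- ===== CLAIM (what is proved, stated in full; the proofs are below) =====
def Claim_equal_map_minute_step_to_resolution_py : Prop := ∀ (step : Int), Dom_map_minute_step_to_resolution_py step → Spec_map_minute_step_to_resolution_py step (map_minute_step_to_resolution_py step)

-- ===== LEMMAS AND PROOFS =====
-- the binary search over the fixed 11-cutoff table, written out as the decision tree it computes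
lemma ports_agree (step : Int) :
    map_minute_step_to_resolution_py step = map_minute_step_to_resolution_py_alt step := by
  unfold map_minute_step_to_resolution_py map_minute_step_to_resolution_py_alt
  dsimp only
  by_cases c0 : step ≤ 1
  · rw [show PySem.List.bisectLeft [1, 3, 5, 10, 15, 30, 60, 120, 180, 360, 720] step = 0 from by
      simp [PySem.List.bisectLeft, PySem.List.bisectLeftLoop]; split_ifs <;> omega]
    simp [pvScanThresholds, PySem.List.pyGet?, PySem.List.pyIdx?, c0]
  by_cases c1 : step ≤ 3
  · rw [show PySem.List.bisectLeft [1, 3, 5, 10, 15, 30, 60, 120, 180, 360, 720] step = 1 from by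
      simp [PySem.List.bisectLeft, PySem.List.bisectLeftLoop]; split_ifs <;> omega]
    simp [pvScanThresholds, PySem.List.pyGet?, PySem.List.pyIdx?, c0, c1]
  by_cases c2 : step ≤ 5
  · rw [show PySem.List.bisectLeft [1, 3, 5, 10, 15, 30, 60, 120, 180, 360, 720] step = 2 from by
      simp [PySem.List.bisectLeft, PySem.List.bisectLeftLoop]; split_ifs <;> omega]
    simp [pvScanThresholds, PySem.List.pyGet?, PySem.List.pyIdx?, c0, c1, c2]
  by_cases c3 : step ≤ 10
  · rw [show PySem.List.bisectLeft [1, 3, 5, 10, 15, 30, 60, 120, 180, 360, 720] step = 3 from by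
      simp [PySem.List.bisectLeft, PySem.List.bisectLeftLoop]; split_ifs <;> omega]
    simp [pvScanThresholds, PySem.List.pyGet?, PySem.List.pyIdx?, c0, c1, c2, c3]
  by_cases c4 : step ≤ 15
  · rw [show PySem.List.bisectLeft [1, 3, 5, 10, 15, 30, 60, 120, 180, 360, 720] step = 4 from by
      simp [PySem.List.bisectLeft, PySem.List.bisectLeftLoop]; split_ifs <;> omega]
    simp [pvScanThresholds, PySem.List.pyGet?, PySem.List.pyIdx?, c0, c1, c2, c3, c4]
  by_cases c5 : step ≤ 30
  · rw [show PySem.List.bisectLeft [1, 3, 5, 10, 15, 30, 60, 120, 180, 360, 720] step = 5 from by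
      simp [PySem.List.bisectLeft, PySem.List.bisectLeftLoop]; split_ifs <;> omega]
    simp [pvScanThresholds, PySem.List.pyGet?, PySem.List.pyIdx?, c0, c1, c2, c3, c4, c5]
  by_cases c6 : step ≤ 60
  · rw [show PySem.List.bisectLeft [1, 3, 5, 10, 15, 30, 60, 120, 180, 360, 720] step = 6 from by
      simp [PySem.List.bisectLeft, PySem.List.bisectLeftLoop]; split_ifs <;> omega]
    simp [pvScanThresholds, PySem.List.pyGet?, PySem.List.pyIdx?, c0, c1, c2, c3, c4, c5, c6]
  by_cases c7 : step ≤ 120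
  · rw [show PySem.List.bisectLeft [1, 3, 5, 10, 15, 30, 60, 120, 180, 360, 720] step = 7 from by
      simp [PySem.List.bisectLeft, PySem.List.bisectLeftLoop]; split_ifs <;> omega]
    simp [pvScanThresholds, PySem.List.pyGet?, PySem.List.pyIdx?, c0, c1, c2, c3, c4, c5, c6, c7]
  by_cases c8 : step ≤ 180
  · rw [show PySem.List.bisectLeft [1, 3, 5, 10, 15, 30, 60, 120, 180, 360, 720] step = 8 from by
      simp [PySem.List.bisectLeft, PySem.List.bisectLeftLoop]; split_ifs <;> omega]
    simp [pvScanThresholds, PySem.List.pyGet?, PySem.List.pyIdx?, c0, c1, c2, c3, c4, c5, c6, c7, c8]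
  by_cases c9 : step ≤ 360
  · rw [show PySem.List.bisectLeft [1, 3, 5, 10, 15, 30, 60, 120, 180, 360, 720] step = 9 from by
      simp [PySem.List.bisectLeft, PySem.List.bisectLeftLoop]; split_ifs <;> omega]
    simp [pvScanThresholds, PySem.List.pyGet?, PySem.List.pyIdx?, c0, c1, c2, c3, c4, c5, c6, c7, c8, c9]
  by_cases c10 : step ≤ 720
  · rw [show PySem.List.bisectLeft [1, 3, 5, 10, 15, 30, 60, 120, 180, 360, 720] step = 10 from by
      simp [PySem.List.bisectLeft, PySem.List.bisectLeftLoop]; split_ifs <;> omega]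
    simp [pvScanThresholds, PySem.List.pyGet?, PySem.List.pyIdx?, c0, c1, c2, c3, c4, c5, c6, c7, c8, c9, c10]
  rw [show PySem.List.bisectLeft [1, 3, 5, 10, 15, 30, 60, 120, 180, 360, 720] step = 11 from by
      simp [PySem.List.bisectLeft, PySem.List.bisectLeftLoop]; split_ifs <;> omega]
  simp [pvScanThresholds, c0, c1, c2, c3, c4, c5, c6, c7, c8, c9, c10]

-- ===== VERDICT (by name: the statement is the Claim_ definition above) =====
theorem map_minute_step_to_resolution_py_spec : Claim_equal_map_minute_step_to_resolution_py := by
  intro step _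
  unfold Spec_map_minute_step_to_resolution_py
  exact ports_agree step
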